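-- pv_equiv track=rewrite | github.com/LichiY/test-runner | rerun_tool/patch.py | _find_method_end
-- ===== SOURCE A (Python) =====
-- from typing import Dict, List, Optional, Tuple
--
-- def _find_method_end(lines: List[str], start_idx: int) -> Optional[int]:
--     """Find the closing brace of a method starting at start_idx.
--
--     Uses brace counting with proper handling of strings, chars, and comments.
--     Handles multi-line method signatures (where '{' is on a later line).
--     """
--     brace_count = 0
--     found_open = False
--     in_block_comment = False
--     in_text_block = False
--
--     for i in range(start_idx, len(lines)):
--         line = lines[i]
--         j = 0
--         while j < len(line):
--             if in_text_block:  # Java text block 可能跨多行，必须在逐行扫描时保留状态。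
--                 end_text_block = line.find('"""', j)
--                 if end_text_block == -1:
--                     break  # 当前行剩余部分仍属于 text block。
--                 j = end_text_block + 3
--                 in_text_block = False
--                 continue
--             # Handle block comments
--             if in_block_comment:
--                 end_comment = line.find('*/', j)
--                 if end_comment == -1:
--                     break  # rest of line is comment
--                 j = end_comment + 2
--                 in_block_comment = False
--                 continue
--
--             ch = line[j]
--
--             # Start of block comment
--             if ch == '/' and j + 1 < len(line) and line[j + 1] == '*':
--                 in_block_comment = True
--                 j += 2
--                 continue
--
--             # Line comment
--             if ch == '/' and j + 1 < len(line) and line[j + 1] == '/':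
--                 break  # rest of line is comment
--
--             # String literal
--             if line.startswith('"""', j):
--                 in_text_block = True
--                 j += 3
--                 continue
--             if ch == '"':
--                 j = _skip_string(line, j, '"')
--                 continue
--
--             # Char literal
--             if ch == "'":
--                 j = _skip_string(line, j, "'")
--                 continue
--
--             if ch == '{':
--                 brace_count += 1
--                 found_open = True
--             elif ch == '}':
--                 brace_count -= 1
--                 if found_open and brace_count == 0:
--                     return i
--
--             j += 1
--
--     return None
--
-- def _skip_string(line: str, start: int, quote_char: str) -> int:
--     """Skip a string/char literal starting at position start. Returns next position."""
--     i = start + 1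
--     while i < len(line):
--         if line[i] == '\\':
--             i += 2  # skip escaped char
--             continue
--         if line[i] == quote_char:
--             return i + 1
--         i += 1
--     return len(line)
-- ===== SOURCE B (Python) =====
-- from typing import List, Optional
--
-- # Same scan as a per-character state machine: one forward pass per line with an
-- # explicit state (NORMAL / BLOCK comment / TEXT block / STRING / CHAR literal),
-- # an escape flag and a quote-run counter, instead of index jumps + _skip_string.
-- NORMAL, BLOCK, TEXT, STRING, CHAR = range(5)
--
-- def _find_method_end(lines: List[str], start_idx: int) -> Optional[int]:
--     state = NORMAL
--     depth = 0
--     opened = False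
--     for i in range(start_idx, len(lines)):
--         line = lines[i]
--         if state == STRING or state == CHAR:
--             state = NORMAL  # plain string/char literals never span lines
--         escape = False
--         run = 0  # consecutive '"' seen while inside a text block
--         skip = 0
--         for j, ch in enumerate(line):
--             if skip:
--                 skip -= 1
--                 continue
--             if state == TEXT:
--                 if ch == '"':
--                     run += 1
--                     if run == 3:
--                         state = NORMAL
--                         run = 0
--                 else:
--                     run = 0
--             elif state == BLOCK:
--                 if ch == '*' and j + 1 < len(line) and line[j + 1] == '/':
--                     state = NORMAL
--                     skip = 1
--             elif state == STRING or state == CHAR: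
--                 if escape:
--                     escape = False
--                 elif ch == '\\':
--                     escape = True
--                 elif ch == ('"' if state == STRING else "'"):
--                     state = NORMAL
--             else:  # NORMAL
--                 if ch == '/' and j + 1 < len(line) and line[j + 1] == '*':
--                     state = BLOCK
--                     skip = 1
--                 elif ch == '/' and j + 1 < len(line) and line[j + 1] == '/':
--                     break  # rest of line is a comment
--                 elif (ch == '"' and j + 2 < len(line)
--                         and line[j + 1] == '"' and line[j + 2] == '"'):
--                     state = TEXT
--                     skip = 2
--                 elif ch == '"':
--                     state = STRING
--                 elif ch == "'":
--                     state = CHAR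
--                 elif ch == '{':
--                     depth += 1
--                     opened = True
--                 elif ch == '}':
--                     depth -= 1
--                     if opened and depth == 0:
--                         return i
--     return None
-- ===== Notes on version B (the rewrite author's own statement) =====
-- stated objective: alternative
-- what changed: Replaced the index-jumping inner loop with its find/startswith lookaheads and the _skip_string helper by a single per-character state machine (NORMAL/BLOCK/TEXT/STRING/CHAR plus escape flag and quote-run counter) that makes one uniform forward pass over each line.
import Mathlib
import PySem

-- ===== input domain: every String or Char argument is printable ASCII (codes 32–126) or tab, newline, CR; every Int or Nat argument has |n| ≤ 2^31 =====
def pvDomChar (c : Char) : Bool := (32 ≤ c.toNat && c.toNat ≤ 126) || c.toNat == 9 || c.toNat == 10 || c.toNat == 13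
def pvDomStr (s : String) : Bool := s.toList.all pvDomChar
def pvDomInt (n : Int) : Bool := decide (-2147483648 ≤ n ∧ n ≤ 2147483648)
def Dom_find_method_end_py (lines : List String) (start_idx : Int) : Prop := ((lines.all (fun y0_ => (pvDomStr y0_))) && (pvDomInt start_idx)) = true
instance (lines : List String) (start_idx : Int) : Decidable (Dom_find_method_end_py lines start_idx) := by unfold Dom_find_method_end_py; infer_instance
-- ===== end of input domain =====

-- B changes: the index-jumping inner loop (find/startswith lookaheads + _skip_string helper) is
-- replaced by a uniform per-character state machine (NORMAL/BLOCK/TEXT/STRING/CHAR + escape flag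
-- + quote-run counter); objective: alternative (same cost, no helper, one uniform forward pass).

-- ===== PORT A =====

-- result of one line scan: either `return i` fired, or the loop state after the line
inductive ARes : Type
  | ret : ARes
  | cont : Int → Bool → Bool → Bool → ARes
deriving DecidableEq, Repr

-- _skip_string's while loop (position i; line[i] on 0 ≤ i < len is exactly cs[i])
def skipStrA (cs : List Char) (i : Nat) (q : Char) : Nat :=
  if h : i < cs.length then
    if cs[i] = '\\' then skipStrA cs (i + 2) q
    else if cs[i] = q then i + 1
    else skipStrA cs (i + 1) q
  else cs.length
termination_by cs.length - i

-- needed by aInner's termination proof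
theorem skipStrA_min_le (cs : List Char) (i : Nat) (q : Char) :
    min i cs.length ≤ skipStrA cs i q := by
  rw [skipStrA]
  split
  · split
    · have := skipStrA_min_le cs (i + 2) q; omega
    · split
      · omega
      · have := skipStrA_min_le cs (i + 1) q; omega
  · omega
termination_by cs.length - i

-- A's inner `while j < len(line)` loop; `line.find(sub, j)` is PySem.Chars.findFrom,
-- `line.startswith('"""', j)` (0 ≤ j) is Chars.startswith on cs.drop j,
-- the guarded lookahead `j+1 < len(line) and line[j+1] == x` is exactly `cs[j+1]? = some x`.
def aInner (cs : List Char) (j : Nat) (bc : Int) (fo ibc itb : Bool) : ARes :=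
  if h : j < cs.length then
    if itb then
      let e := PySem.Chars.findFrom cs ['"', '"', '"'] (j : Int) none
      if he : e = -1 then ARes.cont bc fo ibc itb
      else aInner cs (e.toNat + 3) bc fo ibc false
    else if ibc then
      let e := PySem.Chars.findFrom cs ['*', '/'] (j : Int) none
      if he : e = -1 then ARes.cont bc fo ibc itb
      else aInner cs (e.toNat + 2) bc fo false itb
    else
      let c := cs[j]
      if c = '/' ∧ cs[j+1]? = some '*' then aInner cs (j + 2) bc fo true itb
      else if c = '/' ∧ cs[j+1]? = some '/' then ARes.cont bc fo ibc itb
      else if PySem.Chars.startswith (cs.drop j) ['"', '"', '"'] then aInner cs (j + 3) bc fo ibc true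
      else if c = '"' then aInner cs (skipStrA cs (j + 1) '"') bc fo ibc itb
      else if c = '\'' then aInner cs (skipStrA cs (j + 1) '\'') bc fo ibc itb
      else if c = '{' then aInner cs (j + 1) (bc + 1) true ibc itb
      else if c = '}' then
        if fo ∧ bc - 1 = 0 then ARes.ret
        else aInner cs (j + 1) (bc - 1) fo ibc itb
      else aInner cs (j + 1) bc fo ibc itb
  else ARes.cont bc fo ibc itb
termination_by cs.length - j
decreasing_by
  all_goals first
    | (have := PySem.Chars.findFrom_natCast_spec cs ['"', '"', '"'] j (le_of_lt h) he; omega)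
    | (have := PySem.Chars.findFrom_natCast_spec cs ['*', '/'] j (le_of_lt h) he; omega)
    | (have h1 := skipStrA_min_le cs (j + 1) '"'; have h2 := skipStrA_min_le cs (j + 1) '\''; omega)

-- A's outer `for i in range(start_idx, len(lines))` loop; lines[i] is pyGet?
-- (none = Python's IndexError, excluded by Pre_).
def aOuter (lines : List String) (is : List Int) (bc : Int) (fo ibc itb : Bool) : Option Int :=
  match is with
  | [] => none
  | i :: rest =>
    match PySem.List.pyGet? lines i with
    | none => none
    | some line =>
      match aInner line.toList 0 bc fo ibc itb with
      | ARes.ret => some i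
      | ARes.cont bc' fo' ibc' itb' => aOuter lines rest bc' fo' ibc' itb'

def find_method_end_py (lines : List String) (start_idx : Int) : Option Int :=
  aOuter lines (PySem.List.pyRange start_idx (lines.length : Int) 1) 0 false false false

-- ===== PORT B =====

inductive BSt : Type
  | normal | block | text | strq | chrq
deriving DecidableEq, Repr

inductive BRes : Type
  | ret : BRes
  | cont : Int → Bool → BSt → BRes
deriving DecidableEq, Repr

-- B's per-character `for j, ch in enumerate(line)` loop with the skip counter;
-- the guarded lookahead `j+k < len(line) and line[j+k] == x` on the remaining
-- characters is exactly rest.head? / rest.tail.head?.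
def bInner : List Char → Nat → Nat → Bool → BSt → Int → Bool → BRes
  | [], _, _, _, st, depth, opened => BRes.cont depth opened st
  | _ :: rest, skip + 1, run, esc, st, depth, opened => bInner rest skip run esc st depth opened
  | c :: rest, 0, run, esc, st, depth, opened =>
    match st with
    | BSt.text =>
      if c = '"' then
        if run + 1 = 3 then bInner rest 0 0 esc BSt.normal depth opened
        else bInner rest 0 (run + 1) esc BSt.text depth opened
      else bInner rest 0 0 esc BSt.text depth opened
    | BSt.block =>
      if c = '*' ∧ rest.head? = some '/' then bInner rest 1 run esc BSt.normal depth opened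
      else bInner rest 0 run esc BSt.block depth opened
    | BSt.strq =>
      if esc then bInner rest 0 run false BSt.strq depth opened
      else if c = '\\' then bInner rest 0 run true BSt.strq depth opened
      else if c = '"' then bInner rest 0 run esc BSt.normal depth opened
      else bInner rest 0 run esc BSt.strq depth opened
    | BSt.chrq =>
      if esc then bInner rest 0 run false BSt.chrq depth opened
      else if c = '\\' then bInner rest 0 run true BSt.chrq depth opened
      else if c = '\'' then bInner rest 0 run esc BSt.normal depth opened
      else bInner rest 0 run esc BSt.chrq depth opened
    | BSt.normal =>
      if c = '/' ∧ rest.head? = some '*' then bInner rest 1 run esc BSt.block depth opened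
      else if c = '/' ∧ rest.head? = some '/' then BRes.cont depth opened BSt.normal
      else if c = '"' ∧ rest.head? = some '"' ∧ rest.tail.head? = some '"' then
        bInner rest 2 run esc BSt.text depth opened
      else if c = '"' then bInner rest 0 run esc BSt.strq depth opened
      else if c = '\'' then bInner rest 0 run esc BSt.chrq depth opened
      else if c = '{' then bInner rest 0 run esc BSt.normal (depth + 1) true
      else if c = '}' then
        if opened ∧ depth - 1 = 0 then BRes.ret
        else bInner rest 0 run esc BSt.normal (depth - 1) opened
      else bInner rest 0 run esc BSt.normal depth opened

-- `if state == STRING or state == CHAR: state = NORMAL` at the top of each line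
def bLineStart (st : BSt) : BSt :=
  match st with
  | BSt.strq => BSt.normal
  | BSt.chrq => BSt.normal
  | s => s

def bOuter (lines : List String) : List Int → BSt → Int → Bool → Option Int
  | [], _, _, _ => none
  | i :: rest, st, depth, opened =>
    match PySem.List.pyGet? lines i with
    | none => none
    | some line =>
      match bInner line.toList 0 0 false (bLineStart st) depth opened with
      | BRes.ret => some i
      | BRes.cont d o st' => bOuter lines rest st' d o

def find_method_end_py_alt (lines : List String) (start_idx : Int) : Option Int :=
  bOuter lines (PySem.List.pyRange start_idx (lines.length : Int) 1) BSt.normal 0 false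

-- ===== PRECONDITION & SPEC =====
-- Pre_ excludes exactly the inputs where Python A raises IndexError (start_idx below
-- -len(lines): lines[start_idx] is then out of range); B raises there too.
def Pre_find_method_end_py (lines : List String) (start_idx : Int) : Prop :=
  -(lines.length : Int) ≤ start_idx
instance (lines : List String) (start_idx : Int) : Decidable (Pre_find_method_end_py lines start_idx) := by unfold Pre_find_method_end_py; infer_instance

def pvWitness_find_method_end_py : List String × Int := (["{}"], 0)

def Spec_find_method_end_py (lines : List String) (start_idx : Int) (out : Option Int) : Prop := out = find_method_end_py_alt lines start_idx
instance (lines : List String) (start_idx : Int) (out : Option Int) : Decidable (Spec_find_method_end_py lines start_idx out) := by unfold Spec_find_method_end_py; infer_instance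

-- ===== CLAIM (what is proved, stated in full; the proofs are below) =====
def Claim_equal_find_method_end_py : Prop := ∀ (lines : List String) (start_idx : Int), Dom_find_method_end_py lines start_idx → Pre_find_method_end_py lines start_idx → Spec_find_method_end_py lines start_idx (find_method_end_py lines start_idx)

-- ===== LEMMAS AND PROOFS =====

theorem go_shift (sub : List Char) : ∀ (t : List Char) (k : Nat),
    PySem.Chars.find.go sub t k =
      if PySem.Chars.find.go sub t 0 = -1 then -1 else PySem.Chars.find.go sub t 0 + k := by
  intro t
  induction t with
  | nil =>
    intro k
    rw [PySem.Chars.find.go, PySem.Chars.find.go]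
    split <;> simp
  | cons c t ih =>
    intro k
    rw [PySem.Chars.find.go]
    conv_rhs => rw [PySem.Chars.find.go]
    split
    · simp
    · rw [ih (k+1), ih 1]
      by_cases hf : PySem.Chars.find.go sub t 0 = -1
      · simp [hf]
      · have h0 : -1 ≤ PySem.Chars.find.go sub t 0 := PySem.Chars.neg_one_le_find t sub
        simp only [if_neg hf]
        rw [if_neg (by omega)]
        push_cast
        ring

theorem find_cons (c : Char) (t sub : List Char) :
    PySem.Chars.find (c :: t) sub =
      if sub.isPrefixOf (c :: t) then 0
      else if PySem.Chars.find t sub = -1 then -1 else PySem.Chars.find t sub + 1 := by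
  unfold PySem.Chars.find
  rw [PySem.Chars.find.go]
  split
  · simp
  · rw [go_shift]
    split <;> simp

theorem find_nil (sub : List Char) (h : sub ≠ []) : PySem.Chars.find [] sub = -1 := by
  unfold PySem.Chars.find
  rw [PySem.Chars.find.go]
  simp [List.isEmpty_iff, h]

def findAbs (cs sub : List Char) (p : Nat) : Int :=
  if PySem.Chars.find (cs.drop p) sub = -1 then -1 else (p : Int) + PySem.Chars.find (cs.drop p) sub

theorem findFrom_eq_findAbs (cs sub : List Char) (p : Nat) (hp : p ≤ cs.length) :
    PySem.Chars.findFrom cs sub (p : Int) none = findAbs cs sub p := by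
  rw [PySem.Chars.findFrom_natCast cs sub p hp]; rfl

theorem findAbs_here (cs sub : List Char) (p : Nat) (h : sub.isPrefixOf (cs.drop p)) :
    findAbs cs sub p = (p : Int) := by
  unfold findAbs
  rw [show PySem.Chars.find (cs.drop p) sub = 0 from ?_]
  · simp
  cases hd : cs.drop p with
  | nil =>
    rw [hd] at h
    have hs : sub = [] := by simpa [List.isPrefixOf_iff_prefix] using h
    subst hs
    unfold PySem.Chars.find
    rw [PySem.Chars.find.go]
    simp
  | cons d r =>
    rw [hd] at h
    rw [find_cons, if_pos h]

theorem findAbs_step (cs sub : List Char) (p : Nat) (hp : p < cs.length)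
    (h : ¬ sub.isPrefixOf (cs.drop p) = true) :
    findAbs cs sub p = findAbs cs sub (p + 1) := by
  have hpre : ¬ sub.isPrefixOf (cs[p] :: cs.drop (p+1)) = true := by
    rw [← List.drop_eq_getElem_cons hp]; exact h
  unfold findAbs
  rw [List.drop_eq_getElem_cons hp, find_cons, if_neg hpre]
  have := PySem.Chars.neg_one_le_find (cs.drop (p+1)) sub
  by_cases hf : PySem.Chars.find (cs.drop (p+1)) sub = -1
  · simp [hf]
  · have h0 : -1 ≤ PySem.Chars.find (List.drop (p + 1) cs) sub := this
    rw [if_neg (by omega), if_neg hf, if_neg (by omega)]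
    push_cast
    ring

theorem findAbs_end (cs sub : List Char) (p : Nat) (h : cs.length ≤ p) (hsub : sub ≠ []) :
    findAbs cs sub p = -1 := by
  unfold findAbs
  rw [List.drop_eq_nil_iff.mpr h, find_nil sub hsub]
  simp

theorem prefix2_cons (a b d : Char) (r : List Char) :
    List.isPrefixOf [a, b] (d :: r) = true ↔ (a = d ∧ r.head? = some b) := by
  cases r with
  | nil => simp [List.isPrefixOf]
  | cons x s =>
    simp [List.isPrefixOf]
    intro _
    exact ⟨fun h => h.symm, fun h => h.symm⟩
theorem prefix3_cons (a b e d : Char) (r : List Char) :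
    List.isPrefixOf [a, b, e] (d :: r) = true ↔
      (a = d ∧ r.head? = some b ∧ r.tail.head? = some e) := by
  cases r with
  | nil => simp [List.isPrefixOf]
  | cons x s =>
    cases s with
    | nil => simp [List.isPrefixOf]
    | cons y t =>
      simp [List.isPrefixOf]
      intro _
      constructor
      · rintro ⟨h1, h2⟩; exact ⟨h1.symm, h2.symm⟩
      · rintro ⟨h1, h2⟩; exact ⟨h1.symm, h2.symm⟩

-- prefix tests at an absolute position
theorem prefix2_drop (cs : List Char) (a b : Char) (p : Nat) :
    List.isPrefixOf [a, b] (cs.drop p) = true ↔ (cs[p]? = some a ∧ cs[p+1]? = some b) := by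
  by_cases hp : p < cs.length
  · rw [List.drop_eq_getElem_cons hp, prefix2_cons, List.head?_drop,
      List.getElem?_eq_getElem hp]
    constructor
    · rintro ⟨h1, h2⟩; exact ⟨by rw [h1], h2⟩
    · rintro ⟨h1, h2⟩; exact ⟨by injection h1 with h; rw [h], h2⟩
  · rw [List.drop_eq_nil_iff.mpr (by omega)]
    simp [List.isPrefixOf, List.getElem?_eq_none (l := cs) (by omega : cs.length ≤ p)]

theorem prefix3_drop (cs : List Char) (a b e : Char) (p : Nat) :
    List.isPrefixOf [a, b, e] (cs.drop p) = true ↔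
      (cs[p]? = some a ∧ cs[p+1]? = some b ∧ cs[p+2]? = some e) := by
  by_cases hp : p < cs.length
  · rw [List.drop_eq_getElem_cons hp, prefix3_cons, List.head?_drop, List.tail_drop,
      List.head?_drop, List.getElem?_eq_getElem hp]
    constructor
    · rintro ⟨h1, h2, h3⟩; exact ⟨by rw [h1], h2, h3⟩
    · rintro ⟨h1, h2, h3⟩; exact ⟨by injection h1 with h; rw [h], h2, h3⟩
  · rw [List.drop_eq_nil_iff.mpr (by omega)]
    simp [List.isPrefixOf, List.getElem?_eq_none (l := cs) (by omega : cs.length ≤ p)]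

theorem noTriple (cs : List Char) (j p : Nat) (c : Char) (hc : cs[j]? = some c)
    (hne : ¬ c = '"') (h1 : p ≤ j) (h2 : j ≤ p + 2) :
    ¬ (List.isPrefixOf ['"', '"', '"'] (cs.drop p) = true) := by
  rw [prefix3_drop]
  rintro ⟨a1, a2, a3⟩
  have hj : j = p ∨ j = p + 1 ∨ j = p + 2 := by omega
  rcases hj with hj | hj | hj <;> subst hj <;>
    [rw [hc] at a1; rw [hc] at a2; rw [hc] at a3] <;> exact hne (by simp_all)

-- one-step unfoldings of A's inner loop
theorem aInner_stop (cs : List Char) (j : Nat) (bc : Int) (fo ibc itb : Bool)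
    (h : ¬ j < cs.length) : aInner cs j bc fo ibc itb = ARes.cont bc fo ibc itb := by
  rw [aInner]; simp [h]

theorem aInner_text_step (cs : List Char) (j : Nat) (bc : Int) (fo ibc : Bool)
    (h : j < cs.length) :
    aInner cs j bc fo ibc true =
      if findAbs cs ['"', '"', '"'] j = -1 then ARes.cont bc fo ibc true
      else aInner cs ((findAbs cs ['"', '"', '"'] j).toNat + 3) bc fo ibc false := by
  rw [aInner]
  simp only [dif_pos h, if_true, dite_eq_ite, findFrom_eq_findAbs cs _ j (le_of_lt h)]

theorem aInner_block_step (cs : List Char) (j : Nat) (bc : Int) (fo : Bool)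
    (h : j < cs.length) :
    aInner cs j bc fo true false =
      if findAbs cs ['*', '/'] j = -1 then ARes.cont bc fo true false
      else aInner cs ((findAbs cs ['*', '/'] j).toNat + 2) bc fo false false := by
  rw [aInner]
  simp only [dif_pos h, Bool.false_eq_true, if_false, if_true, dite_eq_ite,
    findFrom_eq_findAbs cs _ j (le_of_lt h)]

theorem aInner_norm_step (cs : List Char) (j : Nat) (bc : Int) (fo : Bool)
    (h : j < cs.length) :
    aInner cs j bc fo false false =
      (if cs[j] = '/' ∧ cs[j+1]? = some '*' then aInner cs (j + 2) bc fo true false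
       else if cs[j] = '/' ∧ cs[j+1]? = some '/' then ARes.cont bc fo false false
       else if PySem.Chars.startswith (cs.drop j) ['"', '"', '"'] then aInner cs (j + 3) bc fo false true
       else if cs[j] = '"' then aInner cs (skipStrA cs (j + 1) '"') bc fo false false
       else if cs[j] = '\'' then aInner cs (skipStrA cs (j + 1) '\'') bc fo false false
       else if cs[j] = '{' then aInner cs (j + 1) (bc + 1) true false false
       else if cs[j] = '}' then
         (if fo ∧ bc - 1 = 0 then ARes.ret else aInner cs (j + 1) (bc - 1) fo false false)
       else aInner cs (j + 1) bc fo false false) := by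
  rw [aInner]
  simp only [dif_pos h, Bool.false_eq_true, if_false]

def phiSt : BSt → Bool × Bool
  | BSt.block => (true, false)
  | BSt.text => (false, true)
  | _ => (false, false)

def phi : BRes → ARes
  | BRes.ret => ARes.ret
  | BRes.cont d o st => ARes.cont d o (phiSt st).1 (phiSt st).2

theorem mainAux : ∀ (n : Nat) (cs : List Char) (j : Nat), j ≤ cs.length → cs.length - j = n →
    ((∀ bc fo, aInner cs j bc fo false false = phi (bInner (cs.drop j) 0 0 false BSt.normal bc fo)) ∧
     (∀ bc fo, aInner cs j bc fo true false = phi (bInner (cs.drop j) 0 0 false BSt.block bc fo)) ∧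
     (∀ bc fo r, r ≤ 2 → r ≤ j → (∀ t, t < r → cs[j-1-t]? = some '"') →
        aInner cs (j - r) bc fo false true = phi (bInner (cs.drop j) 0 r false BSt.text bc fo)) ∧
     (∀ bc fo esc, aInner cs (skipStrA cs (if esc then j + 1 else j) '"') bc fo false false =
        phi (bInner (cs.drop j) 0 0 esc BSt.strq bc fo)) ∧
     (∀ bc fo esc, aInner cs (skipStrA cs (if esc then j + 1 else j) '\'') bc fo false false =
        phi (bInner (cs.drop j) 0 0 esc BSt.chrq bc fo))) := by
  intro n
  induction n using Nat.strong_induction_on with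
  | _ n IH =>
  intro cs j hj hn
  by_cases hlt : j < cs.length
  case neg =>
    have hdrop : cs.drop j = [] := List.drop_eq_nil_iff.mpr (by omega)
    have hstop := fun p (hp : ¬ p < cs.length) bc fo ibc itb => aInner_stop cs p bc fo ibc itb hp
    refine ⟨?_, ?_, ?_, ?_, ?_⟩
    · intro bc fo; rw [hdrop, aInner_stop cs j bc fo false false hlt]; rfl
    · intro bc fo; rw [hdrop, aInner_stop cs j bc fo true false hlt]; rfl
    · intro bc fo r hr2 hrj hq
      rw [hdrop]
      show aInner cs (j - r) bc fo false true = ARes.cont bc fo false true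
      rcases Nat.eq_zero_or_pos r with hr | hr
      · subst hr; rw [aInner_stop cs (j - 0) bc fo false true (by omega)]
      · have hfend : findAbs cs ['"', '"', '"'] j = -1 := findAbs_end cs _ j (by omega) (by simp)
        have hlen3 : ∀ p, p < cs.length → cs.length < p + 3 →
            ¬ (List.isPrefixOf ['"', '"', '"'] (cs.drop p) = true) := by
          intro p hp hp3 hpre
          have := (List.isPrefixOf_iff_prefix.mp hpre).length_le
          simp [List.length_drop] at this
          omega
        have hchain : findAbs cs ['"', '"', '"'] (j - r) = -1 := by
          interval_cases r
          · rw [findAbs_step cs _ (j - 1) (by omega) (hlen3 (j - 1) (by omega) (by omega))]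
            have : j - 1 + 1 = j := by omega
            rw [this, hfend]
          · rw [findAbs_step cs _ (j - 2) (by omega) (hlen3 (j - 2) (by omega) (by omega))]
            have h2 : j - 2 + 1 = j - 1 := by omega
            rw [h2, findAbs_step cs _ (j - 1) (by omega) (hlen3 (j - 1) (by omega) (by omega))]
            have : j - 1 + 1 = j := by omega
            rw [this, hfend]
        rw [aInner_text_step cs (j - r) bc fo false (by omega), if_pos hchain]
    · intro bc fo esc
      have hsk : skipStrA cs (if esc then j + 1 else j) '"' = cs.length := by
        rw [skipStrA]; rw [dif_neg (by split <;> omega)]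
      rw [hdrop, hsk, aInner_stop cs cs.length bc fo false false (by omega)]; rfl
    · intro bc fo esc
      have hsk : skipStrA cs (if esc then j + 1 else j) '\'' = cs.length := by
        rw [skipStrA]; rw [dif_neg (by split <;> omega)]
      rw [hdrop, hsk, aInner_stop cs cs.length bc fo false false (by omega)]; rfl
  case pos =>
    have hdropj : cs.drop j = cs[j] :: cs.drop (j + 1) := List.drop_eq_getElem_cons hlt
    have hcj : cs[j]? = some cs[j] := List.getElem?_eq_getElem hlt
    -- induction hypothesis at any strictly larger position
    have IHat : ∀ p, j < p → p ≤ cs.length →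
        ((∀ bc fo, aInner cs p bc fo false false = phi (bInner (cs.drop p) 0 0 false BSt.normal bc fo)) ∧
         (∀ bc fo, aInner cs p bc fo true false = phi (bInner (cs.drop p) 0 0 false BSt.block bc fo)) ∧
         (∀ bc fo r, r ≤ 2 → r ≤ p → (∀ t, t < r → cs[p-1-t]? = some '"') →
            aInner cs (p - r) bc fo false true = phi (bInner (cs.drop p) 0 r false BSt.text bc fo)) ∧
         (∀ bc fo esc, aInner cs (skipStrA cs (if esc then p + 1 else p) '"') bc fo false false =
            phi (bInner (cs.drop p) 0 0 esc BSt.strq bc fo)) ∧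
         (∀ bc fo esc, aInner cs (skipStrA cs (if esc then p + 1 else p) '\'') bc fo false false =
            phi (bInner (cs.drop p) 0 0 esc BSt.chrq bc fo))) := by
      intro p hp hpl
      exact IH (cs.length - p) (by omega) cs p hpl rfl
    refine ⟨?_, ?_, ?_, ?_, ?_⟩
    · -- NORMAL
      intro bc fo
      rw [aInner_norm_step cs j bc fo hlt]
      conv_rhs => rw [hdropj]
      simp only [bInner, List.head?_drop, List.tail_drop, show j + 1 + 1 = j + 2 from rfl]
      by_cases h1 : cs[j] = '/' ∧ cs[j+1]? = some '*'
      · rw [if_pos h1, if_pos h1]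
        have hl1 : j + 1 < cs.length := by
          by_contra hcon
          rw [List.getElem?_eq_none (by omega)] at h1; exact absurd h1.2 (by simp)
        have hd1 : cs.drop (j + 1) = '*' :: cs.drop (j + 2) := by
          rw [List.drop_eq_getElem_cons hl1]
          have : cs[j+1] = '*' := by
            have := h1.2; rw [List.getElem?_eq_getElem hl1] at this; injection this
          rw [this]
        rw [hd1]
        show aInner cs (j + 2) bc fo true false = phi (bInner (cs.drop (j + 2)) 0 0 false BSt.block bc fo)
        exact (IHat (j + 2) (by omega) (by omega)).2.1 bc fo
      · rw [if_neg h1, if_neg h1]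
        by_cases h2 : cs[j] = '/' ∧ cs[j+1]? = some '/'
        · rw [if_pos h2, if_pos h2]; rfl
        · rw [if_neg h2, if_neg h2]
          by_cases h3 : cs[j] = '"' ∧ cs[j+1]? = some '"' ∧ cs[j+2]? = some '"'
          · have h3' : PySem.Chars.startswith (cs.drop j) ['"', '"', '"'] = true := by
              show List.isPrefixOf _ _ = true
              rw [prefix3_drop]
              exact ⟨by rw [hcj, h3.1], h3.2.1, h3.2.2⟩
            rw [if_pos h3', if_pos h3]
            have hl2 : j + 2 < cs.length := by
              by_contra hcon
              have h22 := h3.2.2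
              rw [List.getElem?_eq_none (show cs.length ≤ j + 2 by omega)] at h22
              simp at h22
            have hd1 : cs.drop (j + 1) = '"' :: cs.drop (j + 2) := by
              rw [List.drop_eq_getElem_cons (by omega : j + 1 < cs.length)]
              have := h3.2.1; rw [List.getElem?_eq_getElem (by omega : j + 1 < cs.length)] at this
              injection this with h; rw [h]
            have hd2 : cs.drop (j + 2) = '"' :: cs.drop (j + 3) := by
              rw [List.drop_eq_getElem_cons hl2]
              have := h3.2.2; rw [List.getElem?_eq_getElem hl2] at this
              injection this with h; rw [h]
            rw [hd1]
            show aInner cs (j + 3) bc fo false true = phi (bInner ('"' :: cs.drop (j + 2)) 2 0 false BSt.text bc fo)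
            rw [show bInner ('"' :: cs.drop (j + 2)) 2 0 false BSt.text bc fo =
                bInner (cs.drop (j + 2)) 1 0 false BSt.text bc fo from rfl, hd2]
            rw [show bInner ('"' :: cs.drop (j + 3)) 1 0 false BSt.text bc fo =
                bInner (cs.drop (j + 3)) 0 0 false BSt.text bc fo from rfl]
            have := (IHat (j + 3) (by omega) (by omega)).2.2.1 bc fo 0 (by omega) (by omega) (by omega)
            simpa using this
          · have h3' : ¬ PySem.Chars.startswith (cs.drop j) ['"', '"', '"'] = true := by
              show ¬ List.isPrefixOf _ _ = true
              rw [prefix3_drop]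
              rintro ⟨a1, a2, a3⟩
              rw [hcj] at a1
              exact h3 ⟨Option.some.inj a1, a2, a3⟩
            rw [if_neg h3', if_neg h3]
            by_cases h4 : cs[j] = '"'
            · rw [if_pos h4, if_pos h4]
              have := (IHat (j + 1) (by omega) (by omega)).2.2.2.1 bc fo false
              simpa using this
            · rw [if_neg h4, if_neg h4]
              by_cases h5 : cs[j] = '\''
              · rw [if_pos h5, if_pos h5]
                have := (IHat (j + 1) (by omega) (by omega)).2.2.2.2 bc fo false
                simpa using this
              · rw [if_neg h5, if_neg h5]
                by_cases h6 : cs[j] = '{'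
                · rw [if_pos h6, if_pos h6]
                  exact (IHat (j + 1) (by omega) (by omega)).1 (bc + 1) true
                · rw [if_neg h6, if_neg h6]
                  by_cases h7 : cs[j] = '}'
                  · rw [if_pos h7, if_pos h7]
                    by_cases h8 : fo = true ∧ bc - 1 = 0
                    · rw [if_pos h8, if_pos h8]; rfl
                    · rw [if_neg h8, if_neg h8]
                      exact (IHat (j + 1) (by omega) (by omega)).1 (bc - 1) fo
                  · rw [if_neg h7, if_neg h7]
                    exact (IHat (j + 1) (by omega) (by omega)).1 bc fo
    · -- BLOCK
      intro bc fo
      rw [aInner_block_step cs j bc fo hlt, hdropj]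
      simp only [bInner, List.head?_drop]
      by_cases h1 : cs[j] = '*' ∧ cs[j+1]? = some '/'
      · have hpre : List.isPrefixOf ['*', '/'] (cs.drop j) = true := by
          rw [prefix2_drop]; exact ⟨by rw [hcj, h1.1], h1.2⟩
        have hhere := findAbs_here cs ['*', '/'] j hpre
        rw [if_pos h1, hhere, if_neg (by omega), show ((j : Int)).toNat = j from by omega]
        have hl1 : j + 1 < cs.length := by
          by_contra hcon
          rw [List.getElem?_eq_none (by omega)] at h1; exact absurd h1.2 (by simp)
        have hd1 : cs.drop (j + 1) = '/' :: cs.drop (j + 2) := by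
          rw [List.drop_eq_getElem_cons hl1]
          have := h1.2; rw [List.getElem?_eq_getElem hl1] at this
          injection this with h; rw [h]
        rw [hd1]
        rw [show bInner ('/' :: cs.drop (j + 2)) 1 0 false BSt.normal bc fo =
            bInner (cs.drop (j + 2)) 0 0 false BSt.normal bc fo from rfl]
        exact (IHat (j + 2) (by omega) (by omega)).1 bc fo
      · have hpre : ¬ List.isPrefixOf ['*', '/'] (cs.drop j) = true := by
          rw [prefix2_drop]
          rintro ⟨a1, a2⟩
          rw [hcj] at a1
          exact h1 ⟨Option.some.inj a1, a2⟩
        rw [if_neg h1, findAbs_step cs ['*', '/'] j hlt hpre]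
        have hB := (IHat (j + 1) (by omega) (by omega)).2.1 bc fo
        rw [← hB]
        by_cases hl1 : j + 1 < cs.length
        · rw [aInner_block_step cs (j + 1) bc fo hl1]
        · rw [aInner_stop cs (j + 1) bc fo true false hl1,
            findAbs_end cs ['*', '/'] (j + 1) (by omega) (by simp), if_pos rfl]
    · -- TEXT
      intro bc fo r hr2 hrj hq
      rw [hdropj]
      simp only [bInner]
      by_cases h1 : cs[j] = '"'
      · rw [if_pos h1]
        by_cases h2 : r + 1 = 3
        · rw [if_pos h2]
          have hr : r = 2 := by omega
          subst hr
          have hpre : List.isPrefixOf ['"', '"', '"'] (cs.drop (j - 2)) = true := by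
            rw [prefix3_drop]
            refine ⟨?_, ?_, ?_⟩
            · have := hq 1 (by omega); simpa using this
            · have := hq 0 (by omega)
              have e : j - 2 + 1 = j - 1 := by omega
              rw [e]; simpa using this
            · have e : j - 2 + 2 = j := by omega
              rw [e, hcj, h1]
          have hhere := findAbs_here cs ['"', '"', '"'] (j - 2) hpre
          rw [aInner_text_step cs (j - 2) bc fo false (by omega), hhere,
            if_neg (by omega), show ((((j : Nat) - 2 : Nat) : Int)).toNat = j - 2 from by omega,
            show j - 2 + 3 = j + 1 from by omega]
          exact (IHat (j + 1) (by omega) (by omega)).1 bc fo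
        · rw [if_neg h2]
          have := (IHat (j + 1) (by omega) (by omega)).2.2.1 bc fo (r + 1) (by omega) (by omega)
            (by
              intro t ht
              rcases Nat.eq_zero_or_pos t with h0 | h0
              · subst h0
                have e : j + 1 - 1 - 0 = j := by omega
                rw [e, hcj, h1]
              · have e : j + 1 - 1 - t = j - 1 - (t - 1) := by omega
                rw [e]; exact hq (t - 1) (by omega))
          rw [show j + 1 - (r + 1) = j - r from by omega] at this
          exact this
      · rw [if_neg h1]
        have hch : findAbs cs ['"', '"', '"'] (j - r) = findAbs cs ['"', '"', '"'] (j + 1) := by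
          have hstep : ∀ p, j - r ≤ p → p ≤ j →
              findAbs cs ['"', '"', '"'] p = findAbs cs ['"', '"', '"'] (p + 1) := by
            intro p hp1 hp2
            exact findAbs_step cs _ p (by omega) (noTriple cs j p cs[j] hcj h1 hp2 (by omega))
          interval_cases r
          · exact hstep j (by omega) (by omega)
          · rw [hstep (j - 1) (by omega) (by omega), show j - 1 + 1 = j from by omega,
              hstep j (by omega) (by omega)]
          · rw [hstep (j - 2) (by omega) (by omega), show j - 2 + 1 = j - 1 from by omega,
              hstep (j - 1) (by omega) (by omega), show j - 1 + 1 = j from by omega,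
              hstep j (by omega) (by omega)]
        have hB := (IHat (j + 1) (by omega) (by omega)).2.2.1 bc fo 0 (by omega) (by omega) (by omega)
        rw [show j + 1 - 0 = j + 1 from by omega] at hB
        rw [← hB]
        by_cases hl1 : j + 1 < cs.length
        · rw [aInner_text_step cs (j - r) bc fo false (by omega),
            aInner_text_step cs (j + 1) bc fo false hl1, hch]
        · rw [aInner_stop cs (j + 1) bc fo false true hl1,
            aInner_text_step cs (j - r) bc fo false (by omega), hch,
            findAbs_end cs ['"', '"', '"'] (j + 1) (by omega) (by simp), if_pos rfl]
    · -- STRING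
      intro bc fo esc
      rw [hdropj]
      simp only [bInner]
      have hsk : skipStrA cs j '"' =
          (if cs[j] = '\\' then skipStrA cs (j + 2) '"'
           else if cs[j] = '"' then j + 1 else skipStrA cs (j + 1) '"') := by
        rw [skipStrA, dif_pos hlt]
      cases esc with
      | true =>
        rw [if_pos rfl]
        simp only [if_true]
        have hIH := (IHat (j + 1) (by omega) (by omega)).2.2.2.1 bc fo false
        simp only [Bool.false_eq_true, if_false] at hIH
        exact hIH
      | false =>
        rw [if_neg (by simp)]
        simp only [Bool.false_eq_true, if_false]
        rw [hsk]
        by_cases hb : cs[j] = '\\'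
        · rw [if_pos hb, if_pos hb]
          have hIH := (IHat (j + 1) (by omega) (by omega)).2.2.2.1 bc fo true
          simp only [if_true] at hIH
          exact hIH
        · rw [if_neg hb, if_neg hb]
          by_cases hc : cs[j] = '"'
          · rw [if_pos hc, if_pos hc]
            exact (IHat (j + 1) (by omega) (by omega)).1 bc fo
          · rw [if_neg hc, if_neg hc]
            have hIH := (IHat (j + 1) (by omega) (by omega)).2.2.2.1 bc fo false
            simp only [Bool.false_eq_true, if_false] at hIH
            exact hIH
    · -- CHAR
      intro bc fo esc
      rw [hdropj]
      simp only [bInner]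
      have hsk : skipStrA cs j '\'' =
          (if cs[j] = '\\' then skipStrA cs (j + 2) '\''
           else if cs[j] = '\'' then j + 1 else skipStrA cs (j + 1) '\'') := by
        rw [skipStrA, dif_pos hlt]
      cases esc with
      | true =>
        rw [if_pos rfl]
        simp only [if_true]
        have hIH := (IHat (j + 1) (by omega) (by omega)).2.2.2.2 bc fo false
        simp only [Bool.false_eq_true, if_false] at hIH
        exact hIH
      | false =>
        rw [if_neg (by simp)]
        simp only [Bool.false_eq_true, if_false]
        rw [hsk]
        by_cases hb : cs[j] = '\\'
        · rw [if_pos hb, if_pos hb]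
          have hIH := (IHat (j + 1) (by omega) (by omega)).2.2.2.2 bc fo true
          simp only [if_true] at hIH
          exact hIH
        · rw [if_neg hb, if_neg hb]
          by_cases hc : cs[j] = '\''
          · rw [if_pos hc, if_pos hc]
            exact (IHat (j + 1) (by omega) (by omega)).1 bc fo
          · rw [if_neg hc, if_neg hc]
            have hIH := (IHat (j + 1) (by omega) (by omega)).2.2.2.2 bc fo false
            simp only [Bool.false_eq_true, if_false] at hIH
            exact hIH

theorem line_eq (cs : List Char) (bc : Int) (fo : Bool) (st : BSt) :
    aInner cs 0 bc fo (phiSt st).1 (phiSt st).2 =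
      phi (bInner cs 0 0 false (bLineStart st) bc fo) := by
  have h := mainAux cs.length cs 0 (by omega) (by omega)
  cases st with
  | normal => simpa using h.1 bc fo
  | block => simpa using h.2.1 bc fo
  | text => simpa using h.2.2.1 bc fo 0 (by omega) (by omega) (by omega)
  | strq => simpa using h.1 bc fo
  | chrq => simpa using h.1 bc fo

theorem outer_eq (lines : List String) : ∀ (is : List Int) (bc : Int) (fo : Bool) (st : BSt),
    aOuter lines is bc fo (phiSt st).1 (phiSt st).2 = bOuter lines is st bc fo := by
  intro is
  induction is with
  | nil => intro bc fo st; rfl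
  | cons i rest ih =>
    intro bc fo st
    show aOuter lines (i :: rest) bc fo (phiSt st).1 (phiSt st).2 = bOuter lines (i :: rest) st bc fo
    rw [aOuter, bOuter]
    cases hg : PySem.List.pyGet? lines i with
    | none => rfl
    | some line =>
      simp only []
      rw [line_eq line.toList bc fo st]
      cases hb : bInner line.toList 0 0 false (bLineStart st) bc fo with
      | ret => rfl
      | cont d o st' =>
        show aOuter lines rest d o (phiSt st').1 (phiSt st').2 = bOuter lines rest st' d o
        exact ih d o st'

-- ===== VERDICT (by name: the statement is the Claim_ definition above) =====
theorem find_method_end_py_spec : Claim_equal_find_method_end_py := by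
  intro lines start_idx _ _
  show find_method_end_py lines start_idx = find_method_end_py_alt lines start_idx
  unfold find_method_end_py find_method_end_py_alt
  exact outer_eq lines (PySem.List.pyRange start_idx (lines.length : Int) 1) 0 false BSt.normal
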